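-- pv_equiv track=rewrite | github.com/btimbermont/adventofcode | 2024/day2/day2.py | is_safe2
-- ===== SOURCE A (Python) =====
-- from typing import List
--
-- def is_safe(values: List[int]) -> bool:
--     diffs = [b - a for a, b in zip(values[:-1], values[1:])]
--     return all([a in [1, 2, 3] for a in diffs]) or all([a in [-1, -2, -3] for a in diffs])
--
-- def is_safe2(values: List[int], allowed_errors: int = 1) -> bool:
--     if is_safe(values):
--         return True
--     if allowed_errors <= 0:
--         return False
--     #ugly: brute force,
--     for i in range(len(values)):
--         popped_one = values.copy()
--         popped_one.pop(i)
--         if is_safe2(popped_one, allowed_errors - 1):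
--             return True
--     return False
-- ===== SOURCE B (Python) =====
-- def is_safe2(values, allowed_errors=1):
--     # DP: longest subsequence whose consecutive diffs all lie in {1,2,3}
--     # (or all in {-1,-2,-3}); safe iff we may delete down to such a subsequence.
--     n = len(values)
--     need = n - max(allowed_errors, 0)
--     if need <= 1:
--         return True
--     for diffs in ((1, 2, 3), (-1, -2, -3)):
--         best = []
--         for j in range(n):
--             bj = 1
--             for i in range(j):
--                 if values[j] - values[i] in diffs and best[i] + 1 > bj:
--                     bj = best[i] + 1
--             best.append(bj)
--         if any(b >= need for b in best):
--             return True
--     return False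
-- ===== Notes on version B (the rewrite author's own statement) =====
-- stated objective: faster
-- what changed: Replaced A's remove-one-element-and-recurse brute force by a quadratic dynamic program computing the longest subsequence whose consecutive differences all lie in {1,2,3} (resp. {-1,-2,-3}), accepting iff it keeps at least len(values) - max(allowed_errors, 0) elements; intended as faster (a timing run measured B 942x at n=16, the largest size where A finished; A timed out on all larger inputs).
import Mathlib
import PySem

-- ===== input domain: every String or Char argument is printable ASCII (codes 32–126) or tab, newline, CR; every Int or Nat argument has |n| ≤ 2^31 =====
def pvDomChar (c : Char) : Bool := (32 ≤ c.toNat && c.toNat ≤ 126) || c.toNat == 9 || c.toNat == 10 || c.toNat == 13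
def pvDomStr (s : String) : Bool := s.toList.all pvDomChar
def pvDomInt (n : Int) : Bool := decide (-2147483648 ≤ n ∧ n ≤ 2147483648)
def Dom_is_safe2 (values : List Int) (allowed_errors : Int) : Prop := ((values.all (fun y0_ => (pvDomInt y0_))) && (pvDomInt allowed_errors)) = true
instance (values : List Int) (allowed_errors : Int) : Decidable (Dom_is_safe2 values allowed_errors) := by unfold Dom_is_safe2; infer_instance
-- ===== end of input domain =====

-- B replaces A's remove-one-and-recurse brute force by a quadratic DP for the longest
-- subsequence whose consecutive differences all lie in {1,2,3} (or all in {-1,-2,-3});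
-- intended as faster (timing: B 942x at n=16, the largest size A finished at all).


-- ===== PORT A =====
-- values[:-1] is List.dropLast and values[1:] is List.tail (both exact on every list, incl. []).
def is_safe (values : List Int) : Bool :=
  let diffs := (values.dropLast.zip values.tail).map fun p => p.2 - p.1
  diffs.all (fun a => decide (a ∈ ([1, 2, 3] : List Int))) ||
    diffs.all (fun a => decide (a ∈ ([-1, -2, -3] : List Int)))

-- Python's `for i in range(len(values)): … if rec: return True … return False` is `.any`;
-- `values.copy(); popped_one.pop(i)` (i always in range) is `values.eraseIdx i`.
-- `.attach` only carries the membership fact `i < len(values)` for termination.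
def is_safe2 (values : List Int) (allowed_errors : Int) : Bool :=
  if is_safe values then true
  else if allowed_errors ≤ 0 then false
  else (List.range values.length).attach.any fun i =>
    is_safe2 (values.eraseIdx i.1) (allowed_errors - 1)
termination_by values.length
decreasing_by
  have h := List.mem_range.mp i.2
  rw [List.length_eraseIdx]
  split <;> omega

-- ===== PORT B =====
-- inner dp loop of Source B: best[j] = 1 + max best[i] over i < j with values[j]-values[i] in diffs.
-- best[i] / values[i] with i in range are List.getD (exact: the indices are always in bounds).
def dpBest (values : List Int) (diffs : List Int) : List Int :=
  (List.range values.length).foldl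
    (fun best j =>
      best ++ [(List.range j).foldl
        (fun bj i =>
          if values.getD j 0 - values.getD i 0 ∈ diffs ∧ best.getD i 0 + 1 > bj
          then best.getD i 0 + 1 else bj) 1])
    []

def is_safe2_alt (values : List Int) (allowed_errors : Int) : Bool :=
  let n := values.length
  let need : Int := (n : Int) - max allowed_errors 0
  if need ≤ 1 then true
  else ([[1, 2, 3], [-1, -2, -3]] : List (List Int)).any fun diffs =>
    (dpBest values diffs).any fun b => decide (need ≤ b)

-- ===== PRECONDITION & SPEC =====
def Spec_is_safe2 (values : List Int) (allowed_errors : Int) (out : Bool) : Prop := out = is_safe2_alt values allowed_errors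
instance (values : List Int) (allowed_errors : Int) (out : Bool) : Decidable (Spec_is_safe2 values allowed_errors out) := by unfold Spec_is_safe2; infer_instance

-- ===== CLAIM (what is proved, stated in full; the proofs are below) =====
def Claim_equal_is_safe2 : Prop := ∀ (values : List Int) (allowed_errors : Int), Dom_is_safe2 values allowed_errors → Spec_is_safe2 values allowed_errors (is_safe2 values allowed_errors)

-- ===== LEMMAS AND PROOFS =====

-- The common specification: some subsequence obtained by deleting at most max(k,0)
-- elements has all its consecutive differences in {1,2,3} or all in {-1,-2,-3}.
def SafeSub (values : List Int) (k : Int) : Prop :=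
  ∃ t, List.Sublist t values ∧ (values.length : Int) - t.length ≤ max k 0 ∧
    (List.IsChain (fun a b => b - a ∈ ([1, 2, 3] : List Int)) t ∨
     List.IsChain (fun a b => b - a ∈ ([-1, -2, -3] : List Int)) t)

theorem diffs_all_iff (s : List Int) : ∀ l : List Int,
    (((l.dropLast.zip l.tail).map fun p => p.2 - p.1).all
      (fun a => decide (a ∈ s)) = true) ↔ List.IsChain (fun a b => b - a ∈ s) l := by
  intro l
  induction l with
  | nil => simp
  | cons a t ih =>
    cases t with
    | nil => simp
    | cons b t' =>
      rw [List.tail_cons] at ih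
      simp only [List.dropLast_cons₂, List.tail_cons, List.zip_cons_cons, List.map_cons,
        List.all_cons, Bool.and_eq_true, decide_eq_true_eq, List.isChain_cons_cons]
      rw [ih, and_comm]

theorem is_safe_iff (values : List Int) : is_safe values = true ↔
    (List.IsChain (fun a b => b - a ∈ ([1, 2, 3] : List Int)) values ∨
     List.IsChain (fun a b => b - a ∈ ([-1, -2, -3] : List Int)) values) := by
  unfold is_safe
  simp only [Bool.or_eq_true]
  rw [diffs_all_iff, diffs_all_iff]

theorem sublist_eraseIdx {t l : List Int} (h : List.Sublist t l) (hlen : t.length < l.length) :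
    ∃ i, i < l.length ∧ List.Sublist t (l.eraseIdx i) := by
  induction h with
  | slnil => simp at hlen
  | cons a h ih => exact ⟨0, by simp, by simp [h]⟩
  | cons₂ a h ih =>
    simp only [List.length_cons, Nat.add_lt_add_iff_right] at hlen
    obtain ⟨i, hi, hsub⟩ := ih hlen
    exact ⟨i + 1, by simpa using hi, by simpa [List.eraseIdx_cons_succ] using hsub.cons₂ a⟩

theorem A_iff (values : List Int) (k : Int) : is_safe2 values k = true ↔ SafeSub values k := by
  suffices h : ∀ n (values : List Int) (k : Int), values.length ≤ n →
      (is_safe2 values k = true ↔ SafeSub values k) from h values.length values k le_rfl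
  intro n
  induction n with
  | zero =>
    intro values k hlen
    have hv : values = [] := List.eq_nil_of_length_eq_zero (Nat.le_zero.mp hlen)
    subst hv
    rw [is_safe2]
    constructor
    · intro _
      exact ⟨[], List.Sublist.refl _, by simpa using le_max_right k 0, Or.inl (by simp)⟩
    · intro _
      simp [is_safe]
  | succ n ih =>
    intro values k hlen
    rw [is_safe2]
    by_cases hsafe : is_safe values = true
    · simp only [hsafe, if_true, true_iff]
      refine ⟨values, List.Sublist.refl _, by linarith [le_max_right k 0], (is_safe_iff values).mp hsafe⟩
    · by_cases hk : k ≤ 0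
      · simp only [hsafe, if_false, hk, if_true, false_iff, Bool.false_eq_true]
        rintro ⟨t, hsub, hcnt, hch⟩
        have hne : t ≠ values := by
          rintro rfl
          exact hsafe ((is_safe_iff t).mpr hch)
        have hlt : t.length < values.length :=
          lt_of_le_of_ne hsub.length_le fun h => hne (hsub.eq_of_length h)
        rw [max_eq_right hk] at hcnt
        omega
      · simp only [hsafe, if_false, hk, List.any_eq_true, List.mem_attach,
          true_and, Subtype.exists, Bool.false_eq_true]
        have hmax : max (k - 1) 0 = k - 1 := max_eq_left (by omega)
        constructor
        · rintro ⟨i, hi, hrec⟩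
          have hi' : i < values.length := List.mem_range.mp hi
          have hlen' : (values.eraseIdx i).length ≤ n := by
            rw [List.length_eraseIdx]
            split <;> omega
          obtain ⟨t, hsub, hcnt, hch⟩ := (ih _ _ hlen').mp hrec
          refine ⟨t, hsub.trans (List.eraseIdx_sublist values i), ?_, hch⟩
          rw [hmax] at hcnt
          rw [List.length_eraseIdx, if_pos hi'] at hcnt
          rw [max_eq_left (by omega : (0:Int) ≤ k)]
          omega
        · rintro ⟨t, hsub, hcnt, hch⟩
          have hne : t ≠ values := by
            rintro rfl
            exact hsafe ((is_safe_iff t).mpr hch)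
          have hlt : t.length < values.length :=
            lt_of_le_of_ne hsub.length_le fun h => hne (hsub.eq_of_length h)
          obtain ⟨i, hi, hsub'⟩ := sublist_eraseIdx hsub hlt
          have hlen' : (values.eraseIdx i).length ≤ n := by
            rw [List.length_eraseIdx]
            split <;> omega
          refine ⟨i, List.mem_range.mpr hi, (ih _ _ hlen').mpr ⟨t, hsub', ?_, hch⟩⟩
          rw [hmax]
          rw [List.length_eraseIdx, if_pos hi]
          rw [max_eq_left (by omega : (0:Int) ≤ k)] at hcnt
          omega

-- chainE values s j: value of best[j] computed by B's dp, defined by recursion on j.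
def chainE (values s : List Int) (j : ℕ) : Int :=
  (List.range j).attach.foldl
    (fun bj i =>
      if values.getD j 0 - values.getD i.1 0 ∈ s ∧ chainE values s i.1 + 1 > bj
      then chainE values s i.1 + 1 else bj) 1
termination_by j
decreasing_by exact List.mem_range.mp i.2

theorem chainE_spec (values s : List Int) (j : ℕ) :
    chainE values s j = (List.range j).foldl
      (fun bj i =>
        if values.getD j 0 - values.getD i 0 ∈ s ∧ chainE values s i + 1 > bj
        then chainE values s i + 1 else bj) 1 := by
  rw [chainE]
  exact List.foldl_attach (l := List.range j)
    (f := fun bj i =>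
      if values.getD j 0 - values.getD i 0 ∈ s ∧ chainE values s i + 1 > bj
      then chainE values s i + 1 else bj) (b := 1)

theorem foldE_init_le (values s : List Int) (j : ℕ) (l : List ℕ) :
    ∀ b0 : Int, b0 ≤ l.foldl
      (fun bj i =>
        if values.getD j 0 - values.getD i 0 ∈ s ∧ chainE values s i + 1 > bj
        then chainE values s i + 1 else bj) b0 := by
  induction l with
  | nil => intro b0; simp
  | cons x l ih =>
    intro b0
    simp only [List.foldl_cons]
    refine le_trans ?_ (ih _)
    split_ifs with h
    · omega
    · exact le_refl _

theorem foldE_mem_le (values s : List Int) (j : ℕ) (l : List ℕ) (i : ℕ)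
    (hmem : i ∈ l) (hcond : values.getD j 0 - values.getD i 0 ∈ s) :
    ∀ b0 : Int, chainE values s i + 1 ≤ l.foldl
      (fun bj i =>
        if values.getD j 0 - values.getD i 0 ∈ s ∧ chainE values s i + 1 > bj
        then chainE values s i + 1 else bj) b0 := by
  induction l with
  | nil => simp at hmem
  | cons x l ih =>
    intro b0
    simp only [List.foldl_cons]
    rcases List.mem_cons.mp hmem with rfl | hmem'
    · refine le_trans ?_ (foldE_init_le values s j l _)
      split_ifs with h
      · exact le_refl _
      · rw [not_and_or] at h
        rcases h with h | h
        · exact absurd hcond h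
        · omega
    · exact ih hmem' _

theorem foldE_cases (values s : List Int) (j : ℕ) (l : List ℕ) :
    ∀ b0 : Int, (l.foldl
      (fun bj i =>
        if values.getD j 0 - values.getD i 0 ∈ s ∧ chainE values s i + 1 > bj
        then chainE values s i + 1 else bj) b0 = b0) ∨
      ∃ i ∈ l, values.getD j 0 - values.getD i 0 ∈ s ∧
        l.foldl (fun bj i =>
          if values.getD j 0 - values.getD i 0 ∈ s ∧ chainE values s i + 1 > bj
          then chainE values s i + 1 else bj) b0 = chainE values s i + 1 := by
  induction l with
  | nil => intro b0; left; rfl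
  | cons x l ih =>
    intro b0
    simp only [List.foldl_cons]
    rcases ih (if values.getD j 0 - values.getD x 0 ∈ s ∧ chainE values s x + 1 > b0
        then chainE values s x + 1 else b0) with h | ⟨i, hmem, hcond, h⟩
    · rw [h]
      split_ifs with hx
      · exact Or.inr ⟨x, List.mem_cons_self .., hx.1, rfl⟩
      · exact Or.inl rfl
    · exact Or.inr ⟨i, List.mem_cons_of_mem _ hmem, hcond, h⟩

theorem one_le_chainE (values s : List Int) (j : ℕ) : 1 ≤ chainE values s j := by
  rw [chainE_spec]
  exact foldE_init_le values s j _ 1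

-- index-chains ending at j: strictly increasing in-bounds indices with every step in s
inductive ChainEnd (values s : List Int) : ℕ → ℕ → Prop
  | single (j : ℕ) (hj : j < values.length) : ChainEnd values s j 1
  | step {i m : ℕ} (j : ℕ) (h : ChainEnd values s i m) (hij : i < j) (hj : j < values.length)
      (hs : values.getD j 0 - values.getD i 0 ∈ s) : ChainEnd values s j (m + 1)

theorem chainEnd_le (values s : List Int) {j m : ℕ} (h : ChainEnd values s j m) :
    (m : Int) ≤ chainE values s j := by
  induction h with
  | single j hj => exact one_le_chainE values s j
  | step j h hij hj hs ih =>
    rename_i i m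
    have h2 : chainE values s i + 1 ≤ chainE values s j := by
      rw [chainE_spec values s j]
      exact foldE_mem_le values s j _ i (List.mem_range.mpr hij) hs 1
    push_cast
    omega

theorem chainE_reaches (values s : List Int) : ∀ j : ℕ, j < values.length →
    ∃ m : ℕ, (m : Int) = chainE values s j ∧ ChainEnd values s j m := by
  intro j
  induction j using Nat.strong_induction_on with
  | _ j ih =>
    intro hj
    rcases foldE_cases values s j (List.range j) 1 with h | ⟨i, hmem, hcond, h⟩
    · exact ⟨1, by rw [chainE_spec, h]; norm_num, ChainEnd.single j hj⟩
    · have hi : i < j := List.mem_range.mp hmem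
      obtain ⟨m, hm, hce⟩ := ih i hi (hi.trans hj)
      refine ⟨m + 1, ?_, ChainEnd.step j hce hi hj hcond⟩
      rw [chainE_spec, h, ← hm]
      push_cast
      ring

theorem dpBest_eq (values s : List Int) :
    dpBest values s = (List.range values.length).map (chainE values s) := by
  unfold dpBest
  suffices h : ∀ m : ℕ,
      (List.range m).foldl
        (fun best j =>
          best ++ [(List.range j).foldl
            (fun bj i =>
              if values.getD j 0 - values.getD i 0 ∈ s ∧ best.getD i 0 + 1 > bj
              then best.getD i 0 + 1 else bj) 1])
        [] = (List.range m).map (chainE values s) from h values.length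
  intro m
  induction m with
  | zero => rfl
  | succ m ih =>
    rw [List.range_succ, List.foldl_append, ih, List.foldl_cons, List.foldl_nil,
      List.map_append, List.map_singleton]
    have hin : (List.range m).foldl
        (fun bj i =>
          if values.getD m 0 - values.getD i 0 ∈ s ∧
              ((List.range m).map (chainE values s)).getD i 0 + 1 > bj
          then ((List.range m).map (chainE values s)).getD i 0 + 1 else bj) 1
        = chainE values s m := by
      rw [chainE_spec]
      apply PySem.List.foldl_congr_mem
      intro acc i hi
      rw [PySem.List.getD_map_range _ _ _ _ (List.mem_range.mp hi)]
    rw [hin]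

theorem idx_map_sublist (values : List Int) (is : List ℕ)
    (hp : List.Pairwise (· < ·) is) (hb : ∀ x ∈ is, x < values.length) :
    List.Sublist (is.map (fun i => values.getD i 0)) values := by
  have hpf : List.Pairwise (· < ·) (is.pmap (fun i h => (⟨i, h⟩ : Fin values.length)) hb) := by
    refine hp.pmap hb ?_
    intro a b ha hb' hab
    exact hab
  have hsub := List.map_getElem_sublist hpf
  have heq : (is.pmap (fun i h => (⟨i, h⟩ : Fin values.length)) hb).map
      (fun x : Fin values.length => values[x]) = is.map (fun i => values.getD i 0) := by
    rw [List.map_pmap]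
    refine (List.pmap_congr_left is ?_).trans
      (List.pmap_eq_map (p := fun i => i < values.length) (H := hb))
    intro a ha h1 h2
    rw [Fin.getElem_fin]
    exact (List.getD_eq_getElem values 0 h1).symm
  rwa [heq] at hsub

theorem chainEnd_of_idx (values s : List Int) : ∀ (l : List ℕ) (j : ℕ),
    List.Pairwise (· < ·) (l ++ [j]) → (∀ x ∈ l ++ [j], x < values.length) →
    List.IsChain (fun a b => values.getD b 0 - values.getD a 0 ∈ s) (l ++ [j]) →
    ChainEnd values s j (l.length + 1) := by
  intro l
  induction l using List.reverseRecOn with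
  | nil =>
    intro j _ hb _
    exact ChainEnd.single j (hb j (by simp))
  | append_singleton l i ih =>
    intro j hp hb hc
    have hps : List.Pairwise (· < ·) (l ++ [i]) :=
      hp.sublist (List.sublist_append_left _ _)
    have hbs : ∀ x ∈ l ++ [i], x < values.length := fun x hx =>
      hb x (List.mem_append_left _ hx)
    have hcs : List.IsChain (fun a b => values.getD b 0 - values.getD a 0 ∈ s) (l ++ [i]) :=
      hc.left_of_append
    have hce := ih i hps hbs hcs
    have hij : i < j := by
      rcases List.pairwise_append.mp hp with ⟨_, _, hrel⟩
      exact hrel i (by simp) j (by simp)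
    have hstep : values.getD j 0 - values.getD i 0 ∈ s := by
      rcases List.isChain_append.mp hc with ⟨_, _, hrel⟩
      exact hrel i (by simp) j (by simp)
    have := ChainEnd.step j hce hij (hb j (by simp)) hstep
    simpa using this

theorem chainEnd_idx (values s : List Int) {j m : ℕ} (h : ChainEnd values s j m) :
    ∃ l : List ℕ, l.length + 1 = m ∧ List.Pairwise (· < ·) (l ++ [j]) ∧
      (∀ x ∈ l ++ [j], x < values.length) ∧
      List.IsChain (fun a b => values.getD b 0 - values.getD a 0 ∈ s) (l ++ [j]) := by
  induction h with
  | single j hj =>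
    exact ⟨[], rfl, by simp, by simpa using hj, by simp⟩
  | step j h hij hj hs ih =>
    rename_i i m
    obtain ⟨l, hlen, hp, hb, hc⟩ := ih
    refine ⟨l ++ [i], by simp; omega, ?_, ?_, ?_⟩
    · rw [List.pairwise_append]
      refine ⟨hp, List.pairwise_singleton _ _, ?_⟩
      intro x hx y hy
      rw [List.mem_singleton] at hy
      subst hy
      rcases (List.mem_append).mp hx with hx | hx
      · rcases List.pairwise_append.mp hp with ⟨_, _, hrel⟩
        exact (hrel x hx i (by simp)).trans hij
      · rw [List.mem_singleton] at hx; subst hx; exact hij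
    · intro x hx
      rcases (List.mem_append).mp hx with hx | hx
      · exact hb x hx
      · rw [List.mem_singleton] at hx; subst hx; exact hj
    · refine hc.append (List.IsChain.singleton _) ?_
      intro x hx y hy
      rw [List.getLast?_concat, Option.mem_some_iff] at hx
      simp only [List.head?_cons, Option.mem_some_iff] at hy
      subst hx; subst hy
      exact hs

theorem B_iff (values : List Int) (k : Int) : is_safe2_alt values k = true ↔ SafeSub values k := by
  simp only [is_safe2_alt]
  split_ifs with hneed
  · simp only [true_iff]
    cases values with
    | nil =>
      refine ⟨[], by simp, ?_, Or.inl (by simp)⟩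
      have := le_max_right k 0
      simp only [List.length_nil, Nat.cast_zero]
      omega
    | cons a rest =>
      refine ⟨[a], (List.nil_sublist rest).cons₂ a, ?_, Or.inl (List.IsChain.singleton a)⟩
      simp only [List.length_cons] at hneed ⊢
      push_cast at hneed ⊢
      omega
  · rw [List.any_eq_true]
    constructor
    · rintro ⟨s, hs, hany⟩
      rw [dpBest_eq, List.any_eq_true] at hany
      obtain ⟨b, hbmem, hble⟩ := hany
      rw [List.mem_map] at hbmem
      obtain ⟨j, hj, rfl⟩ := hbmem
      rw [decide_eq_true_eq] at hble
      have hj' : j < values.length := List.mem_range.mp hj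
      obtain ⟨m, hm, hce⟩ := chainE_reaches values s j hj'
      obtain ⟨l, hlen, hp, hb, hc⟩ := chainEnd_idx values s hce
      refine ⟨(l ++ [j]).map (fun i => values.getD i 0), idx_map_sublist _ _ hp hb, ?_, ?_⟩
      · have hlm : ((l ++ [j]).map (fun i => values.getD i 0)).length = m := by
          simp only [List.length_map, List.length_append, List.length_singleton]
          omega
        rw [hlm]
        omega
      · have hcm : List.IsChain (fun a b => b - a ∈ s)
            ((l ++ [j]).map (fun i => values.getD i 0)) := (List.isChain_map _).mpr hc
        simp only [List.mem_cons, List.not_mem_nil, or_false] at hs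
        rcases hs with rfl | rfl
        · exact Or.inl hcm
        · exact Or.inr hcm
    · rintro ⟨t, hsub, hcnt, hch⟩
      have hlen2 : (2 : Int) ≤ (values.length : Int) - max k 0 := by omega
      have htlen : (values.length : Int) - max k 0 ≤ (t.length : Int) := by omega
      obtain ⟨s, hs, hch'⟩ : ∃ s ∈ ([[1, 2, 3], [-1, -2, -3]] : List (List Int)),
          List.IsChain (fun a b => b - a ∈ s) t := by
        rcases hch with h | h
        · exact ⟨[1, 2, 3], by simp, h⟩
        · exact ⟨[-1, -2, -3], by simp, h⟩
      obtain ⟨isF, ht, hpF⟩ := List.sublist_eq_map_getElem hsub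
      have hne : isF ≠ [] := by
        rintro rfl
        rw [List.map_nil] at ht
        rw [ht] at htlen
        simp only [List.length_nil, Nat.cast_zero] at htlen
        omega
      have hneN : isF.map Fin.val ≠ [] := by simpa using hne
      have ht' : t = (isF.map Fin.val).map (fun i => values.getD i 0) := by
        rw [ht, List.map_map]
        apply List.map_congr_left
        intro x _
        simp only [Function.comp_apply, Fin.getElem_fin]
        exact (List.getD_eq_getElem values 0 x.isLt).symm
      have hpN : List.Pairwise (· < ·) (isF.map Fin.val) := hpF.map _ (fun _ _ h => h)
      have hbN : ∀ x ∈ isF.map Fin.val, x < values.length := by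
        intro x hx
        rw [List.mem_map] at hx
        obtain ⟨y, _, rfl⟩ := hx
        exact y.isLt
      have hdec : (isF.map Fin.val).dropLast ++ [(isF.map Fin.val).getLast hneN]
          = isF.map Fin.val := List.dropLast_concat_getLast hneN
      have hcN : List.IsChain (fun a b => values.getD b 0 - values.getD a 0 ∈ s)
          (isF.map Fin.val) := by
        rw [ht'] at hch'
        exact (List.isChain_map _).mp hch'
      have hce := chainEnd_of_idx values s ((isF.map Fin.val).dropLast)
        ((isF.map Fin.val).getLast hneN) (hdec.symm ▸ hpN) (hdec.symm ▸ hbN) (hdec.symm ▸ hcN)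
      have hlast : (isF.map Fin.val).getLast hneN < values.length :=
        hbN _ (List.getLast_mem hneN)
      have hlenN : (isF.map Fin.val).dropLast.length + 1 = (isF.map Fin.val).length := by
        rw [List.length_dropLast]
        have := List.length_pos_of_ne_nil hneN
        omega
      rw [hlenN] at hce
      have hle := chainEnd_le values s hce
      have htl : t.length = (isF.map Fin.val).length := by rw [ht']; simp
      refine ⟨s, hs, ?_⟩
      rw [dpBest_eq, List.any_eq_true]
      refine ⟨chainE values s ((isF.map Fin.val).getLast hneN), ?_, ?_⟩
      · exact List.mem_map.mpr ⟨_, List.mem_range.mpr hlast, rfl⟩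
      · rw [decide_eq_true_eq]
        rw [htl] at htlen
        omega

-- ===== VERDICT (by name: the statement is the Claim_ definition above) =====
theorem is_safe2_spec : Claim_equal_is_safe2 := by
  unfold Claim_equal_is_safe2
  intro values k _
  unfold Spec_is_safe2
  have ha := A_iff values k
  have hb := B_iff values k
  cases hA : is_safe2 values k <;> cases hB : is_safe2_alt values k <;> simp_all
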